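-- pv_equiv track=rewrite | github.com/KarlBotha/VPA | tools/recover/scan_archives.py | generate_recovery_map
-- ===== SOURCE A (Python) =====
-- PATTERNS = {
--   "gui_manager": r"class\s+(VPAGUIManager|VPAMainApplication)\b",
--   "login_form": r"class\s+(LoginForm|LoginDialog|VPALogin)\b",
--   "registration": r"class\s+(Registration|RegisterDialog|VPARegister)\b",
--   "settings_panel": r"class\s+(SettingsPanel|VPASettings|ConfigPanel)\b",
--   "oauth_callback": r"def\s+(oauth_callback|handle_oauth|process_oauth)\b",
--   "email_handler": r"class\s+(EmailHandler|VPAEmail|MailManager)\b",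
--   "llm_client": r"class\s+(LLMClient|ChatGPTClient|OpenAIClient)\b",
--   "stt_engine": r"class\s+(STTEngine|SpeechRecognition|VoiceInput)\b",
--   "tts_engine": r"class\s+(TTSEngine|TextToSpeech|VoiceOutput)\b",
--   "plugin_loader": r"class\s+(PluginLoader|VPAPlugin|ModuleManager)\b",
--   "event_handler": r"class\s+(EventHandler|VPAEvents|MessageBus)\b",
--   "auth_manager": r"class\s+(AuthManager|Authentication|UserAuth)\b",
--   "db_manager": r"class\s+(DatabaseManager|VPADatabase|DataStore)\b",
--   "config_manager": r"class\s+(ConfigManager|VPAConfig|Settings)\b",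
--   "app_launcher": r"def\s+(main|run_app|launch_vpa)\b",
--   "ui_builder": r"class\s+(UIBuilder|InterfaceBuilder|VPAInterface)\b",
--   "voice_commands": r"class\s+(VoiceCommands|CommandProcessor|VPACommands)\b",
--   "security_layer": r"class\s+(SecurityLayer|Encryption|VPASecure)\b",
--   "notification_system": r"class\s+(NotificationSystem|VPANotify|AlertManager)\b",
--   "file_manager": r"class\s+(FileManager|VPAFiles|DocumentHandler)\b",
--   "scheduler": r"class\s+(Scheduler|TaskManager|VPAScheduler)\b"
-- }
--
-- def generate_recovery_map(scan_results):
--     """Generate recovery map with best candidates for each symbol"""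
--     recovery_map = {}
--
--     for pattern_name in PATTERNS.keys():
--         candidates = []
--         for filepath, matches in scan_results.items():
--             if matches.get(pattern_name):
--                 # Score files based on path preferences
--                 score = 0
--                 path_lower = filepath.lower()
--
--                 # Prefer certain directories
--                 if 'src/' in path_lower:
--                     score += 10
--                 elif 'vpa/' in path_lower:
--                     score += 8
--                 elif 'archive/' in path_lower:
--                     score += 5
--                 elif 'legacy/' in path_lower:
--                     score += 3
--
--                 # Prefer specific modules
--                 if pattern_name in ['gui_manager', 'main_window', 'chat_interface'] and 'gui' in path_lower:
--                     score += 5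
--                 elif pattern_name in ['auth_coord', 'login_window', 'register_window'] and 'auth' in path_lower:
--                     score += 5
--                 elif pattern_name in ['openai_client', 'anthropic_client', 'google_ai'] and ('llm' in path_lower or 'ai' in path_lower):
--                     score += 5
--                 elif pattern_name in ['speech_recognition', 'whisper_client', 'microphone'] and 'audio' in path_lower:
--                     score += 5
--
--                 # Prefer non-test files
--                 if 'test' not in path_lower:
--                     score += 2
--
--                 candidates.append((filepath, score))
--
--         # Sort by score (highest first) and take top candidates
--         candidates.sort(key=lambda x: x[1], reverse=True)
--         recovery_map[pattern_name] = [c[0] for c in candidates[:5]]  # Top 5 candidates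
--
--     return recovery_map
-- ===== SOURCE B (Python) =====
-- PATTERNS = {
--   "gui_manager": r"class\s+(VPAGUIManager|VPAMainApplication)\b",
--   "login_form": r"class\s+(LoginForm|LoginDialog|VPALogin)\b",
--   "registration": r"class\s+(Registration|RegisterDialog|VPARegister)\b",
--   "settings_panel": r"class\s+(SettingsPanel|VPASettings|ConfigPanel)\b",
--   "oauth_callback": r"def\s+(oauth_callback|handle_oauth|process_oauth)\b",
--   "email_handler": r"class\s+(EmailHandler|VPAEmail|MailManager)\b",
--   "llm_client": r"class\s+(LLMClient|ChatGPTClient|OpenAIClient)\b",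
--   "stt_engine": r"class\s+(STTEngine|SpeechRecognition|VoiceInput)\b",
--   "tts_engine": r"class\s+(TTSEngine|TextToSpeech|VoiceOutput)\b",
--   "plugin_loader": r"class\s+(PluginLoader|VPAPlugin|ModuleManager)\b",
--   "event_handler": r"class\s+(EventHandler|VPAEvents|MessageBus)\b",
--   "auth_manager": r"class\s+(AuthManager|Authentication|UserAuth)\b",
--   "db_manager": r"class\s+(DatabaseManager|VPADatabase|DataStore)\b",
--   "config_manager": r"class\s+(ConfigManager|VPAConfig|Settings)\b",
--   "app_launcher": r"def\s+(main|run_app|launch_vpa)\b",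
--   "ui_builder": r"class\s+(UIBuilder|InterfaceBuilder|VPAInterface)\b",
--   "voice_commands": r"class\s+(VoiceCommands|CommandProcessor|VPACommands)\b",
--   "security_layer": r"class\s+(SecurityLayer|Encryption|VPASecure)\b",
--   "notification_system": r"class\s+(NotificationSystem|VPANotify|AlertManager)\b",
--   "file_manager": r"class\s+(FileManager|VPAFiles|DocumentHandler)\b",
--   "scheduler": r"class\s+(Scheduler|TaskManager|VPAScheduler)\b"
-- }
--
-- # scoring tables replacing the elif chains (the pattern-name lists are pairwise disjoint,
-- # so first-match lookup reproduces the original elif semantics)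
-- _DIR_SCORES = [('src/', 10), ('vpa/', 8), ('archive/', 5), ('legacy/', 3)]
-- _MODULE_BONUS = [
--     (['gui_manager', 'main_window', 'chat_interface'], ['gui']),
--     (['auth_coord', 'login_window', 'register_window'], ['auth']),
--     (['openai_client', 'anthropic_client', 'google_ai'], ['llm', 'ai']),
--     (['speech_recognition', 'whisper_client', 'microphone'], ['audio']),
-- ]
--
--
-- def _score(pattern_name, path_lower):
--     score = next((pts for sub, pts in _DIR_SCORES if sub in path_lower), 0)
--     for names, subs in _MODULE_BONUS:
--         if pattern_name in names:
--             if any(sub in path_lower for sub in subs):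
--                 score += 5
--             break
--     if 'test' not in path_lower:
--         score += 2
--     return score
--
--
-- def _insert(best, item):
--     """Insert item into a score-descending list, after equal scores (stable)."""
--     if not best or best[0][1] < item[1]:
--         return [item] + best
--     return [best[0]] + _insert(best[1:], item)
--
--
-- def generate_recovery_map(scan_results):
--     """Generate recovery map with best candidates for each symbol"""
--     # No sorting: keep only a bounded best-5 list per pattern, maintained by
--     # stable ordered insertion while streaming over the matching files.
--     recovery_map = {}
--     for pattern_name in PATTERNS:
--         best = []  # at most 5 (filepath, score), score-descending, ties in arrival order
--         for filepath, matches in scan_results.items():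
--             if matches.get(pattern_name):
--                 best = _insert(best, (filepath, _score(pattern_name, filepath.lower())))[:5]
--         recovery_map[pattern_name] = [fp for fp, _ in best]
--     return recovery_map
-- ===== Notes on version B (the rewrite author's own statement) =====
-- stated objective: alternative
-- what changed: B never sorts: per pattern it streams over the matching files keeping only a bounded best-5 list maintained by stable ordered insertion (truncated after each insert), and the elif scoring chains are replaced by table-driven first-match lookups (_DIR_SCORES / _MODULE_BONUS).
import Mathlib
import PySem

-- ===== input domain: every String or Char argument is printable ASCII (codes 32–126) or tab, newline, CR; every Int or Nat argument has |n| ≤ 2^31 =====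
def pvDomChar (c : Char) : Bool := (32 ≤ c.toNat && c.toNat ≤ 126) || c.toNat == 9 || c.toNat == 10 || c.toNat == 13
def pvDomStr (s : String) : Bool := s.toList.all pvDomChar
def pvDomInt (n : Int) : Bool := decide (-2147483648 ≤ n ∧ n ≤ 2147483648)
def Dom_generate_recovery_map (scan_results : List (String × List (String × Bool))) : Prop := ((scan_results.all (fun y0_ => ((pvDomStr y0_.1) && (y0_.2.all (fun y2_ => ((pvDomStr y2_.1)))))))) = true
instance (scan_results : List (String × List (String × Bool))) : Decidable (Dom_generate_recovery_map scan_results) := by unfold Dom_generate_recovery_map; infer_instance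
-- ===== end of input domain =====

-- B replaces the per-pattern full sort by a bounded best-5 list maintained by stable
-- ordered insertion, and the elif scoring chains by table-driven first-match lookups.

-- PATTERNS.keys() (the regex values are never used by this function)
def pvPatternNames : List String :=
  ["gui_manager", "login_form", "registration", "settings_panel", "oauth_callback",
   "email_handler", "llm_client", "stt_engine", "tts_engine", "plugin_loader",
   "event_handler", "auth_manager", "db_manager", "config_manager", "app_launcher",
   "ui_builder", "voice_commands", "security_layer", "notification_system",
   "file_manager", "scheduler"]

-- ===== PORT A =====
def generate_recovery_map (scan_results : List (String × List (String × Bool))) : List (String × List String) :=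
  (pvPatternNames.foldl (fun recovery_map pattern_name =>
    let candidates := scan_results.foldl (fun candidates fm =>
      if (PySem.Dict.mk fm.2).getD pattern_name false then
        let path_lower := PySem.Str.lower fm.1
        let score : Int := 0
        let score := if PySem.Str.isIn "src/" path_lower then score + 10
          else if PySem.Str.isIn "vpa/" path_lower then score + 8
          else if PySem.Str.isIn "archive/" path_lower then score + 5
          else if PySem.Str.isIn "legacy/" path_lower then score + 3
          else score
        let score := if ["gui_manager", "main_window", "chat_interface"].contains pattern_name && PySem.Str.isIn "gui" path_lower then score + 5
          else if ["auth_coord", "login_window", "register_window"].contains pattern_name && PySem.Str.isIn "auth" path_lower then score + 5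
          else if ["openai_client", "anthropic_client", "google_ai"].contains pattern_name && (PySem.Str.isIn "llm" path_lower || PySem.Str.isIn "ai" path_lower) then score + 5
          else if ["speech_recognition", "whisper_client", "microphone"].contains pattern_name && PySem.Str.isIn "audio" path_lower then score + 5
          else score
        let score := if !(PySem.Str.isIn "test" path_lower) then score + 2 else score
        candidates ++ [(fm.1, score)]
      else candidates) []
    let candidates := PySem.List.sorted candidates (fun x => x.2) true
    recovery_map.insert pattern_name ((candidates.take 5).map (fun c => c.1)))
    PySem.Dict.empty).items

-- ===== PORT B =====
-- scoring tables of Source B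
def pvDirScores : List (String × Int) := [("src/", 10), ("vpa/", 8), ("archive/", 5), ("legacy/", 3)]
def pvModuleBonusTable : List (List String × List String) :=
  [(["gui_manager", "main_window", "chat_interface"], ["gui"]),
   (["auth_coord", "login_window", "register_window"], ["auth"]),
   (["openai_client", "anthropic_client", "google_ai"], ["llm", "ai"]),
   (["speech_recognition", "whisper_client", "microphone"], ["audio"])]

-- the for-loop with break inside _score
def pvBonusLoop : List (List String × List String) → String → String → Int → Int
  | [], _, _, score => score
  | e :: rest, pattern_name, path_lower, score =>
    if e.1.contains pattern_name then
      (if e.2.any (fun sub => PySem.Str.isIn sub path_lower) then score + 5 else score)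
    else pvBonusLoop rest pattern_name path_lower score

-- helper _score of Source B
def pvScore (pattern_name path_lower : String) : Int :=
  let score := ((pvDirScores.find? (fun p => PySem.Str.isIn p.1 path_lower)).map Prod.snd).getD 0
  let score := pvBonusLoop pvModuleBonusTable pattern_name path_lower score
  if !(PySem.Str.isIn "test" path_lower) then score + 2 else score

-- helper _insert of Source B: stable ordered insertion into a score-descending list
def pvInsert : List (String × Int) → (String × Int) → List (String × Int)
  | [], item => [item]
  | b :: t, item => if b.2 < item.2 then item :: b :: t else b :: pvInsert t item

def generate_recovery_map_alt (scan_results : List (String × List (String × Bool))) : List (String × List String) :=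
  (pvPatternNames.foldl (fun recovery_map pattern_name =>
    let best := scan_results.foldl (fun best fm =>
      if (PySem.Dict.mk fm.2).getD pattern_name false then
        (pvInsert best (fm.1, pvScore pattern_name (PySem.Str.lower fm.1))).take 5
      else best) []
    recovery_map.insert pattern_name (best.map (fun c => c.1)))
    PySem.Dict.empty).items

-- ===== PRECONDITION & SPEC =====
def Spec_generate_recovery_map (scan_results : List (String × List (String × Bool))) (out : List (String × List String)) : Prop := out = generate_recovery_map_alt scan_results
instance (scan_results : List (String × List (String × Bool))) (out : List (String × List String)) : Decidable (Spec_generate_recovery_map scan_results out) := by unfold Spec_generate_recovery_map; infer_instance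

-- ===== CLAIM =====
def Claim_equal_generate_recovery_map : Prop := ∀ (scan_results : List (String × List (String × Bool))), Dom_generate_recovery_map scan_results → Spec_generate_recovery_map scan_results (generate_recovery_map scan_results)

-- ===== LEMMAS AND PROOFS =====

-- proof-only names for the per-candidate test and the two scoring expressions
def pvMatch (fm : String × List (String × Bool)) (n : String) : Bool :=
  (PySem.Dict.mk fm.2).getD n false

def pvScoreA (fm : String × List (String × Bool)) (n : String) : String × Int :=
  let path_lower := PySem.Str.lower fm.1
  let score : Int := 0
  let score := if PySem.Str.isIn "src/" path_lower then score + 10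
    else if PySem.Str.isIn "vpa/" path_lower then score + 8
    else if PySem.Str.isIn "archive/" path_lower then score + 5
    else if PySem.Str.isIn "legacy/" path_lower then score + 3
    else score
  let score := if ["gui_manager", "main_window", "chat_interface"].contains n && PySem.Str.isIn "gui" path_lower then score + 5
    else if ["auth_coord", "login_window", "register_window"].contains n && PySem.Str.isIn "auth" path_lower then score + 5
    else if ["openai_client", "anthropic_client", "google_ai"].contains n && (PySem.Str.isIn "llm" path_lower || PySem.Str.isIn "ai" path_lower) then score + 5
    else if ["speech_recognition", "whisper_client", "microphone"].contains n && PySem.Str.isIn "audio" path_lower then score + 5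
    else score
  let score := if !(PySem.Str.isIn "test" path_lower) then score + 2 else score
  (fm.1, score)

def pvScoreB (fm : String × List (String × Bool)) (n : String) : String × Int :=
  (fm.1, pvScore n (PySem.Str.lower fm.1))

def pvCandsA (scan : List (String × List (String × Bool))) (pn : String) : List (String × Int) :=
  scan.foldl (fun c fm => if pvMatch fm pn then c ++ [pvScoreA fm pn] else c) []

def pvTop (l : List (String × Int)) : List String :=
  ((PySem.List.sorted l (fun x => x.2) true).take 5).map (fun c => c.1)

lemma pvNodup : pvPatternNames.Nodup := by decide

-- first-match over the _DIR_SCORES table is the directory elif chain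
lemma pvDir_eq (p : String) :
    ((pvDirScores.find? (fun q => PySem.Str.isIn q.1 p)).map Prod.snd).getD 0
      = (if PySem.Str.isIn "src/" p then (10 : Int)
         else if PySem.Str.isIn "vpa/" p then 8
         else if PySem.Str.isIn "archive/" p then 5
         else if PySem.Str.isIn "legacy/" p then 3
         else 0) := by
  simp only [pvDirScores, List.find?]
  split_ifs <;> simp_all

-- the _MODULE_BONUS loop with break is the module elif chain (the name lists are disjoint)
lemma pvBonus_eq (n p : String) (d : Int) :
    pvBonusLoop pvModuleBonusTable n p d
      = (if ["gui_manager", "main_window", "chat_interface"].contains n && PySem.Str.isIn "gui" p then d + 5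
         else if ["auth_coord", "login_window", "register_window"].contains n && PySem.Str.isIn "auth" p then d + 5
         else if ["openai_client", "anthropic_client", "google_ai"].contains n && (PySem.Str.isIn "llm" p || PySem.Str.isIn "ai" p) then d + 5
         else if ["speech_recognition", "whisper_client", "microphone"].contains n && PySem.Str.isIn "audio" p then d + 5
         else d) := by
  simp only [pvBonusLoop, pvModuleBonusTable, List.any_cons, List.any_nil, Bool.or_false]
  by_cases c1 : n = "gui_manager" ∨ n = "main_window" ∨ n = "chat_interface"
  · rcases c1 with rfl | rfl | rfl <;> simp
  · by_cases c2 : n = "auth_coord" ∨ n = "login_window" ∨ n = "register_window"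
    · rcases c2 with rfl | rfl | rfl <;> simp
    · by_cases c3 : n = "openai_client" ∨ n = "anthropic_client" ∨ n = "google_ai"
      · rcases c3 with rfl | rfl | rfl <;> simp
      · by_cases c4 : n = "speech_recognition" ∨ n = "whisper_client" ∨ n = "microphone"
        · rcases c4 with rfl | rfl | rfl <;> simp
        · simp [c1, c2, c3, c4]

-- the two scoring routines agree
lemma pvScore_eq (fm : String × List (String × Bool)) (n : String) :
    pvScoreA fm n = pvScoreB fm n := by
  unfold pvScoreA pvScoreB pvScore
  simp only [zero_add]
  rw [pvDir_eq, pvBonus_eq]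

lemma pvCandsA_eq (scan : List (String × List (String × Bool))) (pn : String) :
    pvCandsA scan pn = (scan.filter (fun fm => pvMatch fm pn)).map (fun fm => pvScoreA fm pn) :=
  (PySem.List.foldl_append_if (fun fm => pvMatch fm pn) (fun fm => pvScoreA fm pn) scan []).trans
    (List.nil_append _)

-- Source B's _insert IS ordered insertion with Python's reverse-sort comparison
lemma pvInsert_eq_insertBy (l : List (String × Int)) (x : String × Int) :
    pvInsert l x = PySem.List.insertBy (fun a b => decide (b.2 < a.2)) x l := by
  induction l with
  | nil => rfl
  | cons b t ih =>
    simp only [pvInsert, PySem.List.insertBy, ih, decide_eq_true_eq]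

-- truncating before an ordered insertion does not change the truncated result
lemma pvInsertBy_take {α : Type} (p : α → α → Bool) (x : α) :
    ∀ (l : List α) (n : Nat),
      (PySem.List.insertBy p x (l.take n)).take n = (PySem.List.insertBy p x l).take n := by
  intro l
  induction l with
  | nil => intro n; simp
  | cons y t ih =>
    intro n
    cases n with
    | zero => rfl
    | succ m =>
      simp only [List.take_succ_cons, PySem.List.insertBy]
      cases h : p x y with
      | true =>
        simp only [if_true]
        cases m with
        | zero => rfl
        | succ k =>
          simp only [List.take_succ_cons, List.take_take]
          rw [Nat.min_eq_left (Nat.le_succ k)]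
      | false => simp only [Bool.false_eq_true, if_false, List.take_succ_cons, ih m]

-- the truncated-insertion fold equals the truncation of the insertion-sort fold
lemma pvFoldInsert_take {α : Type} (p : α → α → Bool) (n : Nat) :
    ∀ (l acc : List α),
      l.foldl (fun b c => (PySem.List.insertBy p c b).take n) (acc.take n)
        = (l.foldl (fun b c => PySem.List.insertBy p c b) acc).take n := by
  intro l
  induction l with
  | nil => intro acc; rfl
  | cons c t ih =>
    intro acc
    simp only [List.foldl_cons, pvInsertBy_take p c acc n, ← ih (PySem.List.insertBy p c acc)]

-- a conditional fold over scan is the fold over the filtered-and-scored candidate list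
lemma pvFold_filter_map {α β γ : Type} (q : α → Bool) (v : α → β) (g : γ → β → γ) :
    ∀ (l : List α) (init : γ),
      l.foldl (fun b a => if q a then g b (v a) else b) init
        = ((l.filter q).map v).foldl g init := by
  intro l
  induction l with
  | nil => intro init; rfl
  | cons a t ih =>
    intro init
    cases h : q a with
    | true => simp [h, ih]
    | false => simp [h, ih]

set_option maxHeartbeats 1000000 in
lemma pvPortA_eq (scan : List (String × List (String × Bool))) :
    generate_recovery_map scan = pvPatternNames.map (fun pn => (pn, pvTop (pvCandsA scan pn))) := by
  unfold generate_recovery_map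
  exact (PySem.Dict.items_foldl_insert_fresh pvPatternNames (fun a => a)
      (fun pn => pvTop (pvCandsA scan pn)) PySem.Dict.empty
      (fun a _ => PySem.Dict.contains_empty a) (by simpa using pvNodup)).trans
    (by rw [show (PySem.Dict.empty : PySem.Dict String (List String)).items = [] from rfl]
        exact List.nil_append _)

-- B's inner stream over scan computes the top 5 of the sorted candidate list
lemma pvPortB_inner (scan : List (String × List (String × Bool))) (pn : String) :
    (scan.foldl (fun best fm =>
        if pvMatch fm pn then (pvInsert best (pvScoreB fm pn)).take 5 else best) [])
      = (PySem.List.sorted ((scan.filter (fun fm => pvMatch fm pn)).map (fun fm => pvScoreB fm pn))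
          (fun x => x.2) true).take 5 := by
  have hf : (fun (b : List (String × Int)) (c : String × Int) => (pvInsert b c).take 5)
      = (fun b c => (PySem.List.insertBy (fun a b => decide (b.2 < a.2)) c b).take 5) := by
    funext b c; rw [pvInsert_eq_insertBy]
  rw [pvFold_filter_map (fun fm => pvMatch fm pn) (fun fm => pvScoreB fm pn)
        (fun b c => (pvInsert b c).take 5) scan [], hf,
    PySem.List.sorted_rev_eq_foldl_insertBy]
  exact pvFoldInsert_take (fun (a b : String × Int) => decide (b.2 < a.2)) 5
    ((scan.filter (fun fm => pvMatch fm pn)).map (fun fm => pvScoreB fm pn)) []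

-- proof-only name for B's per-pattern value
def pvBVal (scan : List (String × List (String × Bool))) (pattern_name : String) : List String :=
  (scan.foldl (fun best fm =>
      if (PySem.Dict.mk fm.2).getD pattern_name false then
        (pvInsert best (fm.1, pvScore pattern_name (PySem.Str.lower fm.1))).take 5
      else best) []).map (fun c => c.1)

set_option maxHeartbeats 1000000 in
lemma pvAlt_rfl (scan : List (String × List (String × Bool))) :
    generate_recovery_map_alt scan
      = (List.foldl (fun (d : PySem.Dict String (List String)) a => d.insert a (pvBVal scan a))
          PySem.Dict.empty pvPatternNames).items := rfl

set_option maxHeartbeats 1000000 in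
lemma pvPortB_eq (scan : List (String × List (String × Bool))) :
    generate_recovery_map_alt scan
      = pvPatternNames.map (fun pn =>
          (pn, pvTop ((scan.filter (fun fm => pvMatch fm pn)).map (fun fm => pvScoreB fm pn)))) := by
  refine (pvAlt_rfl scan).trans ((PySem.Dict.items_foldl_insert_fresh pvPatternNames (fun a => a)
      (pvBVal scan) PySem.Dict.empty (fun a _ => PySem.Dict.contains_empty a)
      (by simpa using pvNodup)).trans ?_)
  rw [show (PySem.Dict.empty : PySem.Dict String (List String)).items = [] from rfl,
    List.nil_append]
  exact List.map_congr_left (fun pn _ =>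
    congrArg (fun l => (pn, l.map (fun c : String × Int => c.1))) (pvPortB_inner scan pn))

theorem pv_main (scan : List (String × List (String × Bool))) :
    generate_recovery_map scan = generate_recovery_map_alt scan := by
  rw [pvPortA_eq scan, pvPortB_eq scan]
  apply List.map_congr_left
  intro n _
  rw [pvCandsA_eq scan n]
  exact congrArg (fun l => (n, pvTop l))
    (List.map_congr_left (fun fm _ => pvScore_eq fm n))

-- ===== VERDICT =====
theorem generate_recovery_map_spec : Claim_equal_generate_recovery_map := by
  intro scan _
  unfold Spec_generate_recovery_map
  exact pv_main scan
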